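-- pv_equiv track=rewrite | github.com/sunxxuns/aiter | hsa/gfx950/fmha_v3_fwd_fp8/tools/tr8_layout_solver.py | v_write_addrs
-- ===== SOURCE A (Python) =====
-- from typing import Iterable, List, Set
--
-- def bitop3(a: int, b: int, c: int, ttbl: int) -> int:
--     out = 0
--     for i in range(32):
--         s0 = (a >> i) & 1
--         s1 = (b >> i) & 1
--         s2 = (c >> i) & 1
--         idx = s0 | (s1 << 1) | (s2 << 2)
--         bit = (ttbl >> idx) & 1
--         out |= (bit << i)
--     return out & 0xFFFFFFFF
--
-- def tr8_base(tid: int, s25: int) -> int: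
--     v2 = (tid << 6) & 0xFFFFFFFF
--     v3 = (tid << 2) & 0xFFFFFFFF
--     v4 = v3 & 48
--     v180 = (tid & 3) << 4
--     v4 = v4 | v180
--     v2 = (v2 & s25) | v4
--     v5 = tid & 16
--     v6 = (tid << 3) & 0xFFFFFFFF
--     v6 = v6 & 8
--     v2 = bitop3(v2, v5, v6, 0x36)
--     return v2 & 0xFFFFFFFF
--
-- def v_write_addr_swizzled(
--     tid: int,
--     base: int,
--     mod_mask: int | None = None,
--     mod_shift: int | None = None,
--     xor_shift: int | None = None,
--     use_tr8_base: bool = False,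
--     s25: int = 0xB80,
--     base_xor: int = 0,
-- ) -> int:
--     if use_tr8_base:
--         v4 = tr8_base(tid, s25)
--     else:
--         v4 = (tid << 4) & 0xFFFFFFFF
--         v4 = bitop3(v4, tid, 0x70, 0x78)
--     if mod_mask is not None and mod_shift is not None and xor_shift is not None:
--         v4 ^= ((v4 & mod_mask) >> mod_shift) << xor_shift
--     v4 ^= base_xor
--     return (base + v4) & 0xFFFFFFFF
--
-- def v_write_addrs(
--     tid: int,
--     base: int,
--     write_offsets: Iterable[int],
--     mod_mask: int | None = None,
--     mod_shift: int | None = None,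
--     xor_shift: int | None = None,
--     use_tr8_base: bool = False,
--     s25: int = 0xB80,
--     base_xor: int = 0,
-- ) -> Set[int]:
--     addr = v_write_addr_swizzled(
--         tid, base, mod_mask, mod_shift, xor_shift, use_tr8_base, s25, base_xor
--     )
--     return {addr + off for off in write_offsets}
-- ===== SOURCE B (Python) =====
-- from typing import Iterable, Set
--
-- def v_write_addrs(
--     tid: int,
--     base: int,
--     write_offsets: Iterable[int],
--     mod_mask: int | None = None,
--     mod_shift: int | None = None,
--     xor_shift: int | None = None,
--     use_tr8_base: bool = False,
--     s25: int = 0xB80,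
--     base_xor: int = 0,
-- ) -> Set[int]:
--     # Closed-form swizzle: the ternary truth tables are constants, so per bit
--     # bitop3(a,b,c,0x78) == (a & b) ^ c and bitop3(a,b,c,0x36) == ((a^b) & ~c) | (~b & c);
--     # compute them as whole-word boolean algebra, no bit loop at all.
--     if use_tr8_base:
--         a = ((tid << 6) & s25 & 0xFFFFFFFF) | ((tid << 2) & 48) | ((tid & 3) << 4)
--         b = tid & 16
--         c = (tid << 3) & 8
--         v4 = (((a ^ b) & ~c) | (~b & c)) & 0xFFFFFFFF
--     else:
--         v4 = (((tid << 4) & tid) ^ 0x70) & 0xFFFFFFFF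
--     if mod_mask is not None and mod_shift is not None and xor_shift is not None:
--         v4 ^= ((v4 & mod_mask) >> mod_shift) << xor_shift
--     v4 ^= base_xor
--     addr = (base + v4) & 0xFFFFFFFF
--     return {addr + off for off in write_offsets}
-- ===== Notes on version B (the rewrite author's own statement) =====
-- stated objective: simpler
-- what changed: the bit-serial bitop3/tr8_base helper machinery (a 32-iteration loop extracting and recombining each bit through the ternary truth table) is replaced by closed-form word-level boolean algebra, since the truth tables are constants: 0x78 is (a&b)^c and 0x36 is ((a^b)&~c)|(~b&c) per bit, so B is a single short function with no bit loop and no helpers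
import Mathlib
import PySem

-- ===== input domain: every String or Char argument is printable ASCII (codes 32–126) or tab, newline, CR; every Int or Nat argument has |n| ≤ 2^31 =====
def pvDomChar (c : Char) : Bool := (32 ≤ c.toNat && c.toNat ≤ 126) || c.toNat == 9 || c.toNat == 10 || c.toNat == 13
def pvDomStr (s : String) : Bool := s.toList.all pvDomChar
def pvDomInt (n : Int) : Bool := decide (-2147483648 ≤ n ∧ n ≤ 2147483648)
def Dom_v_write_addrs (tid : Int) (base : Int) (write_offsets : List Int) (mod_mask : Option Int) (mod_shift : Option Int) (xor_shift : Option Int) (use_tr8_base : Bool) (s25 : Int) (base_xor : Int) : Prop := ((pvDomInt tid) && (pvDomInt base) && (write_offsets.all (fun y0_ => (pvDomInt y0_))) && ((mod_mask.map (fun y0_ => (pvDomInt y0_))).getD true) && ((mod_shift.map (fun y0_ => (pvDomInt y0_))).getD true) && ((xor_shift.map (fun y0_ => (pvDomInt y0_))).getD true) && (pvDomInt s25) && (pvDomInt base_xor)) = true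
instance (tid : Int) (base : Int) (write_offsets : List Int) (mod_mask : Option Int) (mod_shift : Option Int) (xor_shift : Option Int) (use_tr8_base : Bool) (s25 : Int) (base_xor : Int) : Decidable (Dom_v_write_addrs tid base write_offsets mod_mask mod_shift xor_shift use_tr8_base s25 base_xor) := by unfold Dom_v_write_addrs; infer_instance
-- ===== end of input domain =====

-- B replaces the whole bit-serial 32-iteration bitop3 swizzle machinery by closed-form
-- word-level boolean algebra (the truth tables are constants: 0x78 is (a&b)^c and 0x36 is
-- ((a^b)&~c)|(~b&c) per bit), leaving no bit loop at all (objective: simpler).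


-- ===== PORT A =====
-- bitop3: for i in range(32): pick the ttbl bit selected by the three input bits at position i
def pvSerStep (a b c ttbl : Int) (out : Int) (i : Nat) : Int :=
  let s0 := PySem.Int.band (a >>> i) 1
  let s1 := PySem.Int.band (b >>> i) 1
  let s2 := PySem.Int.band (c >>> i) 1
  let idx := PySem.Int.bor (PySem.Int.bor s0 (s1 <<< 1)) (s2 <<< 2)
  -- idx is built from 0/1 bits, so it is nonnegative: `ttbl >> idx` is exactly `ttbl >>> idx.toNat`
  let bit := PySem.Int.band (ttbl >>> idx.toNat) 1
  PySem.Int.bor out (bit <<< i)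

def pvBitop3A (a b c ttbl : Int) : Int :=
  PySem.Int.band ((List.range 32).foldl (pvSerStep a b c ttbl) 0) 0xFFFFFFFF

def pvTr8BaseA (tid s25 : Int) : Int :=
  let v2 := PySem.Int.band (tid <<< 6) 0xFFFFFFFF
  let v3 := PySem.Int.band (tid <<< 2) 0xFFFFFFFF
  let v4 := PySem.Int.band v3 48
  let v180 := (PySem.Int.band tid 3) <<< 4
  let v4 := PySem.Int.bor v4 v180
  let v2 := PySem.Int.bor (PySem.Int.band v2 s25) v4
  let v5 := PySem.Int.band tid 16
  let v6 := PySem.Int.band (tid <<< 3) 0xFFFFFFFF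
  let v6 := PySem.Int.band v6 8
  let v2 := pvBitop3A v2 v5 v6 0x36
  PySem.Int.band v2 0xFFFFFFFF

def pvSwizzledA (tid base : Int) (mod_mask mod_shift xor_shift : Option Int)
    (use_tr8_base : Bool) (s25 base_xor : Int) : Int :=
  let v4 := if use_tr8_base then pvTr8BaseA tid s25
            else pvBitop3A (PySem.Int.band (tid <<< 4) 0xFFFFFFFF) tid 0x70 0x78
  -- shifts are exact for mod_shift, xor_shift ≥ 0 (Pre_ excludes the negative-shift ValueError)
  let v4 := match mod_mask, mod_shift, xor_shift with
            | some mm, some ms, some xs =>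
                PySem.Int.bxor v4 ((PySem.Int.band v4 mm >>> ms.toNat) <<< xs.toNat)
            | _, _, _ => v4
  let v4 := PySem.Int.bxor v4 base_xor
  PySem.Int.band (base + v4) 0xFFFFFFFF

def v_write_addrs (tid : Int) (base : Int) (write_offsets : List Int) (mod_mask : Option Int) (mod_shift : Option Int) (xor_shift : Option Int) (use_tr8_base : Bool) (s25 : Int) (base_xor : Int) : List Int :=
  let addr := pvSwizzledA tid base mod_mask mod_shift xor_shift use_tr8_base s25 base_xor
  PySem.Set.ofList (write_offsets.map (fun off => addr + off))

-- ===== PORT B =====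
-- Source B is a single function with no helpers and no loops over bits: the swizzle is
-- closed-form word-level boolean algebra; Python's `~` is Lean's Int.not.
def v_write_addrs_alt (tid : Int) (base : Int) (write_offsets : List Int) (mod_mask : Option Int) (mod_shift : Option Int) (xor_shift : Option Int) (use_tr8_base : Bool) (s25 : Int) (base_xor : Int) : List Int :=
  let v4 :=
    if use_tr8_base then
      let a := PySem.Int.bor (PySem.Int.bor
                 (PySem.Int.band (PySem.Int.band (tid <<< 6) s25) 0xFFFFFFFF)
                 (PySem.Int.band (tid <<< 2) 48))
                 ((PySem.Int.band tid 3) <<< 4)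
      let b := PySem.Int.band tid 16
      let c := PySem.Int.band (tid <<< 3) 8
      PySem.Int.band (PySem.Int.bor (PySem.Int.band (PySem.Int.bxor a b) (Int.not c))
                                    (PySem.Int.band (Int.not b) c)) 0xFFFFFFFF
    else
      PySem.Int.band (PySem.Int.bxor (PySem.Int.band (tid <<< 4) tid) 0x70) 0xFFFFFFFF
  let v4 := match mod_mask, mod_shift, xor_shift with
            | some mm, some ms, some xs =>
                PySem.Int.bxor v4 ((PySem.Int.band v4 mm >>> ms.toNat) <<< xs.toNat)
            | _, _, _ => v4
  let v4 := PySem.Int.bxor v4 base_xor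
  let addr := PySem.Int.band (base + v4) 0xFFFFFFFF
  PySem.Set.ofList (write_offsets.map (fun off => addr + off))

-- ===== PRECONDITION & SPEC =====
-- Pre_ excludes exactly the inputs where Python A raises ValueError ("negative shift count"):
-- all three of mod_mask/mod_shift/xor_shift given with a negative mod_shift or xor_shift.
def Pre_v_write_addrs (tid : Int) (base : Int) (write_offsets : List Int) (mod_mask : Option Int) (mod_shift : Option Int) (xor_shift : Option Int) (use_tr8_base : Bool) (s25 : Int) (base_xor : Int) : Prop :=
  (mod_mask.isSome ∧ mod_shift.isSome ∧ xor_shift.isSome) →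
    (0 ≤ mod_shift.getD 0 ∧ 0 ≤ xor_shift.getD 0)
instance (tid : Int) (base : Int) (write_offsets : List Int) (mod_mask : Option Int) (mod_shift : Option Int) (xor_shift : Option Int) (use_tr8_base : Bool) (s25 : Int) (base_xor : Int) : Decidable (Pre_v_write_addrs tid base write_offsets mod_mask mod_shift xor_shift use_tr8_base s25 base_xor) := by unfold Pre_v_write_addrs; infer_instance

def pvWitness_v_write_addrs : Int × Int × List Int × Option Int × Option Int × Option Int × Bool × Int × Int :=
  (3, 64, [0, 16], none, none, none, false, 2944, 0)

def Spec_v_write_addrs (tid : Int) (base : Int) (write_offsets : List Int) (mod_mask : Option Int) (mod_shift : Option Int) (xor_shift : Option Int) (use_tr8_base : Bool) (s25 : Int) (base_xor : Int) (out : List Int) : Prop := out = v_write_addrs_alt tid base write_offsets mod_mask mod_shift xor_shift use_tr8_base s25 base_xor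
instance (tid : Int) (base : Int) (write_offsets : List Int) (mod_mask : Option Int) (mod_shift : Option Int) (xor_shift : Option Int) (use_tr8_base : Bool) (s25 : Int) (base_xor : Int) (out : List Int) : Decidable (Spec_v_write_addrs tid base write_offsets mod_mask mod_shift xor_shift use_tr8_base s25 base_xor out) := by unfold Spec_v_write_addrs; infer_instance

-- ===== CLAIM (what is proved, stated in full; the proofs are below) =====
def Claim_equal_v_write_addrs : Prop := ∀ (tid : Int) (base : Int) (write_offsets : List Int) (mod_mask : Option Int) (mod_shift : Option Int) (xor_shift : Option Int) (use_tr8_base : Bool) (s25 : Int) (base_xor : Int), Dom_v_write_addrs tid base write_offsets mod_mask mod_shift xor_shift use_tr8_base s25 base_xor → Pre_v_write_addrs tid base write_offsets mod_mask mod_shift xor_shift use_tr8_base s25 base_xor → Spec_v_write_addrs tid base write_offsets mod_mask mod_shift xor_shift use_tr8_base s25 base_xor (v_write_addrs tid base write_offsets mod_mask mod_shift xor_shift use_tr8_base s25 base_xor)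

-- ===== LEMMAS AND PROOFS =====

-- Nat model of A's bit-serial loop (proof-only)
def pvTb (ttbl a b c : Int) (i : Nat) : Bool :=
  ttbl.testBit ((if c.testBit i then 4 else 0) + (if b.testBit i then 2 else 0) + (if a.testBit i then 1 else 0))

def pvFn (ttbl a b c : Int) : Nat → Nat
  | 0 => 0
  | n + 1 => pvFn ttbl a b c n ||| ((if pvTb ttbl a b c n then 1 else 0) <<< n)

lemma pv_mod2 (x : Int) : x % 2 = if x.testBit 0 then 1 else 0 := by
  rcases x with m | m
  · rcases Nat.mod_two_eq_zero_or_one m with h | h <;>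
      simp [Int.testBit, Nat.testBit_zero, h] <;> omega
  · rcases Nat.mod_two_eq_zero_or_one m with h | h <;>
      simp [Int.testBit, Nat.testBit_zero, h, Int.negSucc_eq] <;> omega

lemma pv_bandOne (x : Int) : PySem.Int.band x 1 = if x.testBit 0 then 1 else 0 := by
  rw [PySem.Int.band_one, PySem.Int.mod_eq_emod_of_pos (by norm_num), pv_mod2]

lemma pv_testBit_shiftRight (x : Int) (j k : Nat) : (x >>> j).testBit k = x.testBit (j + k) := by
  rcases x with m | m
  · show (Int.ofNat (m >>> j)).testBit k = _
    simp [Int.testBit, Nat.testBit_shiftRight]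
  · show (Int.negSucc (m >>> j)).testBit k = _
    simp [Int.testBit, Nat.testBit_shiftRight]

lemma pv_bandOne_shift (x : Int) (j : Nat) :
    PySem.Int.band (x >>> j) 1 = if x.testBit j then 1 else 0 := by
  rw [pv_bandOne, pv_testBit_shiftRight]
  simp

lemma pv_maskN_testBit (k : Nat) : (4294967295 : Nat).testBit k = decide (k < 32) := by
  rw [show (4294967295 : Nat) = 2 ^ 32 - 1 from rfl, Nat.testBit_two_pow_sub_one]

lemma pv_mask_cases (x : Int) :
    ∃ n : Nat, PySem.Int.band x 0xFFFFFFFF = (n : Int) ∧ n < 4294967296 ∧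
      ∀ k, k < 32 → n.testBit k = x.testBit k := by
  rcases x with m | m
  · refine ⟨m &&& 4294967295, ?_, ?_, ?_⟩
    · exact_mod_cast PySem.Int.band_natCast m 4294967295
    · have := Nat.and_le_right (n := m) (m := 4294967295)
      omega
    · intro k hk
      rw [Nat.testBit_and, pv_maskN_testBit]
      simp [Int.testBit, hk]
  · have h1 : PySem.Int.band (Int.negSucc m) 0xFFFFFFFF =
        ((4294967295 - (4294967295 &&& m) : Nat) : Int) := by
      have hneg : ¬ (0 : Int) ≤ Int.negSucc m := by rw [Int.negSucc_eq]; omega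
      rw [PySem.Int.band.eq_1, if_neg hneg, if_pos (by norm_num)]
      have hm : (-(Int.negSucc m) - 1).toNat = m := by rw [Int.negSucc_eq]; omega
      rw [hm, show (4294967295 : Int).toNat = 4294967295 from rfl]
    have h2 : (4294967295 : Nat) &&& m = m % 2 ^ 32 := by
      rw [Nat.and_comm]
      exact Nat.and_two_pow_sub_one_eq_mod m 32
    have hlt : m % 2 ^ 32 < 2 ^ 32 := Nat.mod_lt _ (by norm_num)
    refine ⟨4294967295 - (4294967295 &&& m), h1, by omega, ?_⟩
    intro k hk
    have h3 : 4294967295 - (4294967295 &&& m) = 2 ^ 32 - (m % 2 ^ 32 + 1) := by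
      rw [h2]; omega
    rw [h3, Nat.testBit_two_pow_sub_succ hlt, Nat.testBit_mod_two_pow]
    simp [Int.testBit, hk]

lemma pv_idx_toNat (s0 s1 s2 : Bool) :
    (PySem.Int.bor (PySem.Int.bor (if s0 then 1 else 0) ((if s1 then (1 : Int) else 0) <<< 1))
        ((if s2 then (1 : Int) else 0) <<< 2)).toNat
      = (if s2 then 4 else 0) + (if s1 then 2 else 0) + (if s0 then 1 else 0) := by
  cases s0 <;> cases s1 <;> cases s2 <;> decide

lemma pv_bit_cast (b : Bool) (i : Nat) :
    ((if b then (1 : Int) else 0) <<< i) = (((if b then 1 else 0) <<< i : Nat) : Int) := by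
  cases b <;> rfl

lemma pv_serStep_eq (a b c ttbl : Int) (o : Nat) (i : Nat) :
    pvSerStep a b c ttbl (o : Int) i = ((o ||| ((if pvTb ttbl a b c i then 1 else 0) <<< i) : Nat) : Int) := by
  dsimp only [pvSerStep]
  rw [pv_bandOne_shift a i, pv_bandOne_shift b i, pv_bandOne_shift c i, pv_idx_toNat,
    pv_bandOne_shift ttbl, pv_bit_cast]
  exact_mod_cast PySem.Int.bor_natCast o
    ((if pvTb ttbl a b c i then 1 else 0) <<< i)

lemma pv_serial_fold (a b c ttbl : Int) (n : Nat) :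
    (List.range n).foldl (pvSerStep a b c ttbl) 0 = ((pvFn ttbl a b c n : Nat) : Int) := by
  induction n with
  | zero => simp [pvFn]
  | succ n ih =>
    rw [List.range_succ, List.foldl_append, ih]
    simp only [List.foldl_cons, List.foldl_nil]
    rw [pv_serStep_eq]
    rfl

lemma pv_testBit_bit (b : Bool) (j : Nat) :
    ((if b then 1 else 0 : Nat)).testBit j = (b && decide (j = 0)) := by
  cases b
  · simp [Nat.zero_testBit]
  · rw [if_pos rfl, show (1 : Nat) = 2 ^ 0 from rfl, Nat.testBit_two_pow]
    simp [eq_comm]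

lemma pv_Fn_testBit (ttbl a b c : Int) (n k : Nat) :
    (pvFn ttbl a b c n).testBit k = (decide (k < n) && pvTb ttbl a b c k) := by
  induction n with
  | zero => simp [pvFn, Nat.zero_testBit]
  | succ n ih =>
    rw [pvFn, Nat.testBit_or, ih, Nat.testBit_shiftLeft, pv_testBit_bit]
    by_cases h1 : k < n
    · have h2 : k < n + 1 := by omega
      have h3 : ¬ (k ≥ n) := by omega
      simp [h1, h2, h3]
    · by_cases h4 : k = n
      · subst h4
        simp
      · have h5 : ¬ (k < n + 1) := by omega
        by_cases h6 : k ≥ n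
        · have h7 : ¬ (k - n = 0) := by omega
          simp [h1, h5, h6, h7]
        · simp [h1, h5, h6]

lemma pv_bitop3A_nat (a b c ttbl : Int) :
    pvBitop3A a b c ttbl = ((pvFn ttbl a b c 32 &&& 4294967295 : Nat) : Int) := by
  dsimp only [pvBitop3A]
  rw [pv_serial_fold]
  exact_mod_cast PySem.Int.band_natCast (pvFn ttbl a b c 32) 4294967295

-- ===== Int testBit toolkit for B's word-level boolean algebra =====
theorem pv_sub_and (m n : Nat) : m - (m &&& n) = m.ldiff n := by
  induction m using Nat.binaryRec generalizing n with
  | zero => simp [Nat.ldiff]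
  | bit b m ih =>
    rw [← Nat.bit_bodd_div2 n, Nat.land_bit, Nat.ldiff_bit, Nat.bit_val, Nat.bit_val, Nat.bit_val,
      ← ih]
    have := Nat.and_le_left (n := m) (m := n.div2)
    cases b <;> cases n.bodd <;> simp <;> omega

lemma pv_testBit_natCast (n k : Nat) : ((n : Int)).testBit k = n.testBit k := by
  simp [Int.testBit]

lemma pv_testBit_negSucc (m k : Nat) : (Int.negSucc m).testBit k = !(m.testBit k) := by
  simp [Int.testBit]

lemma pv_neg_natCast (n : Nat) : -(n : Int) - 1 = Int.negSucc n := by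
  rw [Int.negSucc_eq]; ring

lemma pv_negSucc_not_nonneg (n : Nat) : ¬ (0 : Int) ≤ Int.negSucc n := by
  rw [Int.negSucc_eq]; omega

lemma pv_negSucc_aux (n : Nat) : (-(Int.negSucc n) - 1).toNat = n := by
  rw [Int.negSucc_eq]; omega

lemma pv_testBit_band (a b : Int) (k : Nat) :
    (PySem.Int.band a b).testBit k = (a.testBit k && b.testBit k) := by
  rcases a with m | m <;> rcases b with n | n <;> (try simp only [Int.ofNat_eq_natCast])
  · rw [PySem.Int.band_natCast, pv_testBit_natCast, pv_testBit_natCast, pv_testBit_natCast,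
      Nat.testBit_and]
  · rw [PySem.Int.band.eq_1, if_pos (Int.natCast_nonneg _), if_neg (pv_negSucc_not_nonneg n),
      pv_negSucc_aux, Int.toNat_natCast, pv_sub_and, pv_testBit_natCast,
      Nat.testBit_ldiff, pv_testBit_natCast, pv_testBit_negSucc]
  · rw [PySem.Int.band.eq_1, if_neg (pv_negSucc_not_nonneg m), if_pos (Int.natCast_nonneg _),
      pv_negSucc_aux, Int.toNat_natCast, pv_sub_and, pv_testBit_natCast,
      Nat.testBit_ldiff, pv_testBit_natCast, pv_testBit_negSucc]
    cases m.testBit k <;> cases n.testBit k <;> rfl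
  · rw [PySem.Int.band.eq_1, if_neg (pv_negSucc_not_nonneg m), if_neg (pv_negSucc_not_nonneg n),
      pv_negSucc_aux, pv_negSucc_aux, pv_neg_natCast, pv_testBit_negSucc, Nat.testBit_or,
      pv_testBit_negSucc, pv_testBit_negSucc]
    cases m.testBit k <;> cases n.testBit k <;> rfl

lemma pv_testBit_bor (a b : Int) (k : Nat) :
    (PySem.Int.bor a b).testBit k = (a.testBit k || b.testBit k) := by
  rcases a with m | m <;> rcases b with n | n <;> (try simp only [Int.ofNat_eq_natCast])
  · rw [PySem.Int.bor_natCast, pv_testBit_natCast, pv_testBit_natCast, pv_testBit_natCast,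
      Nat.testBit_or]
  · rw [PySem.Int.bor.eq_1, if_pos (Int.natCast_nonneg _), if_neg (pv_negSucc_not_nonneg n),
      pv_negSucc_aux, Int.toNat_natCast, pv_sub_and, pv_neg_natCast,
      pv_testBit_negSucc, Nat.testBit_ldiff, pv_testBit_natCast, pv_testBit_negSucc]
    cases m.testBit k <;> cases n.testBit k <;> rfl
  · rw [PySem.Int.bor.eq_1, if_neg (pv_negSucc_not_nonneg m), if_pos (Int.natCast_nonneg _),
      pv_negSucc_aux, Int.toNat_natCast, pv_sub_and, pv_neg_natCast,
      pv_testBit_negSucc, Nat.testBit_ldiff, pv_testBit_natCast, pv_testBit_negSucc]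
    cases m.testBit k <;> cases n.testBit k <;> rfl
  · rw [PySem.Int.bor.eq_1, if_neg (pv_negSucc_not_nonneg m), if_neg (pv_negSucc_not_nonneg n),
      pv_negSucc_aux, pv_negSucc_aux, pv_neg_natCast, pv_testBit_negSucc, Nat.testBit_and,
      pv_testBit_negSucc, pv_testBit_negSucc]
    cases m.testBit k <;> cases n.testBit k <;> rfl

lemma pv_testBit_bxor (a b : Int) (k : Nat) :
    (PySem.Int.bxor a b).testBit k = (a.testBit k).xor (b.testBit k) := by
  rcases a with m | m <;> rcases b with n | n <;> (try simp only [Int.ofNat_eq_natCast])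
  · rw [PySem.Int.bxor_natCast, pv_testBit_natCast, pv_testBit_natCast, pv_testBit_natCast,
      Nat.testBit_xor]
  · rw [PySem.Int.bxor.eq_1, if_pos (Int.natCast_nonneg _), if_neg (pv_negSucc_not_nonneg n),
      pv_negSucc_aux, Int.toNat_natCast, pv_neg_natCast, pv_testBit_negSucc,
      Nat.testBit_xor, pv_testBit_natCast, pv_testBit_negSucc]
    cases m.testBit k <;> cases n.testBit k <;> rfl
  · rw [PySem.Int.bxor.eq_1, if_neg (pv_negSucc_not_nonneg m), if_pos (Int.natCast_nonneg _),
      pv_negSucc_aux, Int.toNat_natCast, pv_neg_natCast, pv_testBit_negSucc,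
      Nat.testBit_xor, pv_testBit_natCast, pv_testBit_negSucc]
    cases m.testBit k <;> cases n.testBit k <;> rfl
  · rw [PySem.Int.bxor.eq_1, if_neg (pv_negSucc_not_nonneg m), if_neg (pv_negSucc_not_nonneg n),
      pv_negSucc_aux, pv_negSucc_aux, pv_testBit_natCast, Nat.testBit_xor, pv_testBit_negSucc,
      pv_testBit_negSucc]
    cases m.testBit k <;> cases n.testBit k <;> rfl

lemma pv_testBit_not (a : Int) (k : Nat) : (Int.not a).testBit k = !(a.testBit k) := by
  rcases a with m | m
  · show (Int.negSucc m).testBit k = _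
    rw [pv_testBit_negSucc]
    simp [Int.testBit]
  · show (Int.ofNat m).testBit k = _
    rw [pv_testBit_negSucc]
    simp [Int.testBit]

lemma pv_testBit_maskInt (k : Nat) : (0xFFFFFFFF : Int).testBit k = decide (k < 32) := by
  rw [show (0xFFFFFFFF : Int) = ((4294967295 : Nat) : Int) from rfl, pv_testBit_natCast,
    pv_maskN_testBit]

lemma pv_testBit_hi {x : Nat} (hx : x < 4294967296) {k : Nat} (hk : 32 ≤ k) :
    x.testBit k = false := by
  apply Nat.testBit_lt_two_pow
  calc x < 2 ^ 32 := hx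
    _ ≤ 2 ^ k := Nat.pow_le_pow_right (by norm_num) hk

-- the two constant truth tables as boolean formulas
lemma pv_tb78 (x y z : Bool) :
    (0x78 : Int).testBit ((if z then 4 else 0) + (if y then 2 else 0) + (if x then 1 else 0))
      = (x && y).xor z := by
  cases x <;> cases y <;> cases z <;> decide

lemma pv_tb36 (x y z : Bool) :
    (0x36 : Int).testBit ((if z then 4 else 0) + (if y then 2 else 0) + (if x then 1 else 0))
      = (((x.xor y) && !z) || (!y && z)) := by
  cases x <;> cases y <;> cases z <;> decide

-- non-tr8 branch: A's bitop3 with table 0x78 is (a & b) ^ c at word level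
lemma pv_false_branch (tid : Int) :
    pvBitop3A (PySem.Int.band (tid <<< 4) 0xFFFFFFFF) tid 0x70 0x78
      = PySem.Int.band (PySem.Int.bxor (PySem.Int.band (tid <<< 4) tid) 0x70) 0xFFFFFFFF := by
  obtain ⟨nB, hEq, hLt, hBit⟩ :=
    pv_mask_cases (PySem.Int.bxor (PySem.Int.band (tid <<< 4) tid) 0x70)
  rw [pv_bitop3A_nat, hEq]
  have : (pvFn 0x78 (PySem.Int.band (tid <<< 4) 0xFFFFFFFF) tid 0x70 32 &&& 4294967295) = nB := by
    apply Nat.eq_of_testBit_eq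
    intro k
    rw [Nat.testBit_and, pv_Fn_testBit, pv_maskN_testBit]
    by_cases hk : k < 32
    · rw [hBit k hk]
      simp only [hk, decide_true, Bool.and_true, Bool.true_and]
      rw [pv_testBit_bxor, pv_testBit_band]
      simp only [pvTb]
      rw [pv_tb78, pv_testBit_band, pv_testBit_maskInt]
      simp [hk]
    · rw [pv_testBit_hi hLt (by omega)]
      simp [hk]
  rw [this]

-- tr8 branch: A's bitop3 with table 0x36 is ((a ^ b) & ~c) | (~b & c) at word level
lemma pv_true_branch (tid s25 : Int) :
    pvTr8BaseA tid s25
      = PySem.Int.band (PySem.Int.bor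
          (PySem.Int.band (PySem.Int.bxor
              (PySem.Int.bor (PySem.Int.bor
                (PySem.Int.band (PySem.Int.band (tid <<< 6) s25) 0xFFFFFFFF)
                (PySem.Int.band (tid <<< 2) 48))
                ((PySem.Int.band tid 3) <<< 4))
              (PySem.Int.band tid 16))
            (Int.not (PySem.Int.band (tid <<< 3) 8)))
          (PySem.Int.band (Int.not (PySem.Int.band tid 16)) (PySem.Int.band (tid <<< 3) 8)))
          0xFFFFFFFF := by
  obtain ⟨nB, hEq, hLt, hBit⟩ := pv_mask_cases (PySem.Int.bor
          (PySem.Int.band (PySem.Int.bxor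
              (PySem.Int.bor (PySem.Int.bor
                (PySem.Int.band (PySem.Int.band (tid <<< 6) s25) 0xFFFFFFFF)
                (PySem.Int.band (tid <<< 2) 48))
                ((PySem.Int.band tid 3) <<< 4))
              (PySem.Int.band tid 16))
            (Int.not (PySem.Int.band (tid <<< 3) 8)))
          (PySem.Int.band (Int.not (PySem.Int.band tid 16)) (PySem.Int.band (tid <<< 3) 8)))
  dsimp only [pvTr8BaseA]
  rw [pv_bitop3A_nat, hEq]
  rw [show PySem.Int.band ((pvFn 0x36 _ _ _ 32 &&& 4294967295 : Nat) : Int) 0xFFFFFFFF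
      = ((pvFn 0x36
          (PySem.Int.bor (PySem.Int.band (PySem.Int.band (tid <<< 6) 0xFFFFFFFF) s25)
            (PySem.Int.bor (PySem.Int.band (PySem.Int.band (tid <<< 2) 0xFFFFFFFF) 48)
              ((PySem.Int.band tid 3) <<< 4)))
          (PySem.Int.band tid 16)
          (PySem.Int.band (PySem.Int.band (tid <<< 3) 0xFFFFFFFF) 8)
          32 &&& 4294967295 &&& 4294967295 : Nat) : Int) from by
        exact_mod_cast PySem.Int.band_natCast _ 4294967295]
  have : (pvFn 0x36
          (PySem.Int.bor (PySem.Int.band (PySem.Int.band (tid <<< 6) 0xFFFFFFFF) s25)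
            (PySem.Int.bor (PySem.Int.band (PySem.Int.band (tid <<< 2) 0xFFFFFFFF) 48)
              ((PySem.Int.band tid 3) <<< 4)))
          (PySem.Int.band tid 16)
          (PySem.Int.band (PySem.Int.band (tid <<< 3) 0xFFFFFFFF) 8)
          32 &&& 4294967295 &&& 4294967295) = nB := by
    apply Nat.eq_of_testBit_eq
    intro k
    rw [Nat.testBit_and, Nat.testBit_and, pv_Fn_testBit, pv_maskN_testBit]
    by_cases hk : k < 32
    · rw [hBit k hk]
      simp only [hk, decide_true, Bool.and_true, Bool.true_and]
      simp only [pvTb]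
      rw [pv_tb36]
      simp only [pv_testBit_bor, pv_testBit_band, pv_testBit_bxor, pv_testBit_not,
        pv_testBit_maskInt, hk, decide_true, Bool.and_true]
      cases h1 : (tid <<< 6).testBit k <;> cases h2 : s25.testBit k <;>
        cases h3 : (tid <<< 2).testBit k <;> cases h4 : ((48 : Int)).testBit k <;>
        cases h5 : ((PySem.Int.band tid 3) <<< 4).testBit k <;>
        cases h6 : tid.testBit k <;> cases h7 : ((16 : Int)).testBit k <;>
        cases h8 : (tid <<< 3).testBit k <;> cases h9 : ((8 : Int)).testBit k <;> rfl
    · rw [pv_testBit_hi hLt (by omega)]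
      simp [hk]
  rw [this]

-- ===== VERDICT (by name: the statement is the Claim_ definition above) =====
theorem v_write_addrs_spec : Claim_equal_v_write_addrs := by
  intro tid base write_offsets mod_mask mod_shift xor_shift use_tr8_base s25 base_xor _ _
  unfold Spec_v_write_addrs v_write_addrs v_write_addrs_alt pvSwizzledA
  cases use_tr8_base
  · rw [if_neg (by simp), if_neg (by simp), pv_false_branch]
  · rw [if_pos rfl, if_pos rfl, pv_true_branch]
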